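-- pv_equiv track=rewrite | github.com/asalybek/WebBackEnd2020 | Week8/codingBat/Warmup-2.py | string_match
-- ===== SOURCE A (Python) =====
-- def string_match(a, b):
--     short = min(len(a), len(b))
--     cnt = 0
--     for i in range(short - 1):
--         a_sub = a[i:i + 2]
--         b_sub = b[i:i + 2]
--         if a_sub == b_sub:
--             cnt = cnt + 1
--     return cnt
-- ===== SOURCE B (Python) =====
-- def string_match(a, b):
--     eq = [x == y for x, y in zip(a, b)]
--     return sum(1 for i in range(len(eq) - 1) if eq[i] and eq[i + 1])
-- ===== Notes on version B (the rewrite author's own statement) =====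
-- stated objective: alternative
-- what changed: B precomputes a per-position boolean equality table over the zipped prefix and counts adjacent pairs of matches, instead of building and comparing two length-2 slices at every position.
import Mathlib
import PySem

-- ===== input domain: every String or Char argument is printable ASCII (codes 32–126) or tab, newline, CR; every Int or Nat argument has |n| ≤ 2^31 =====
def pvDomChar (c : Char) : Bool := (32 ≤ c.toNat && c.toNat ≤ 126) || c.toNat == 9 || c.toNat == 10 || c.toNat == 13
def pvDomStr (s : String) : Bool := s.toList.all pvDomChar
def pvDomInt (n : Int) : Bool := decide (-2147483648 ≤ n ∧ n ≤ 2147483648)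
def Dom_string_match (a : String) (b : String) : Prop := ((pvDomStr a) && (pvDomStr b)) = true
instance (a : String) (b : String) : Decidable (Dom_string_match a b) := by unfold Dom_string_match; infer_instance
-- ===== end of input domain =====

-- B replaces per-position length-2 slice comparison by a precomputed equality table plus an
-- adjacent-pair count (alternative decomposition; same O(n) cost).

-- ===== PORT A =====
def string_match (a : String) (b : String) : Int :=
  let la := a.toList
  let lb := b.toList
  let short : Int := min (la.length : Int) (lb.length : Int)
  (PySem.List.pyRange 0 (short - 1) 1).foldl (fun cnt i =>
    let a_sub := PySem.List.slice la (some i) (some (i + 2))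
    let b_sub := PySem.List.slice lb (some i) (some (i + 2))
    if a_sub = b_sub then cnt + 1 else cnt) 0

-- ===== PORT B =====
def string_match_alt (a : String) (b : String) : Int :=
  let eq := List.zipWith (fun x y => x == y) a.toList b.toList
  (PySem.List.pyRange 0 ((eq.length : Int) - 1) 1).foldl (fun s i =>
    if PySem.List.pyGetD eq i false && PySem.List.pyGetD eq (i + 1) false then s + 1 else s) 0

-- ===== PRECONDITION & SPEC =====
def Spec_string_match (a : String) (b : String) (out : Int) : Prop := out = string_match_alt a b
instance (a : String) (b : String) (out : Int) : Decidable (Spec_string_match a b out) := by unfold Spec_string_match; infer_instance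

-- ===== CLAIM (what is proved, stated in full; the proofs are below) =====
def Claim_equal_string_match : Prop := ∀ (a : String) (b : String), Dom_string_match a b → Spec_string_match a b (string_match a b)

-- ===== LEMMAS AND PROOFS =====

-- a[i:i+2] == b[i:i+2] iff eq[i] and eq[i+1], for i + 1 < min len
theorem pvStepEq (la lb : List Char) (k : Nat) (hk : k + 1 < min la.length lb.length) :
    (PySem.List.slice la (some (k : Int)) (some ((k : Int) + 2)) =
      PySem.List.slice lb (some (k : Int)) (some ((k : Int) + 2)))
    ↔ ((PySem.List.pyGetD (List.zipWith (fun x y => x == y) la lb) (k : Int) false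
        && PySem.List.pyGetD (List.zipWith (fun x y => x == y) la lb) ((k : Int) + 1) false) = true) := by
  have hla : k + 1 < la.length := lt_of_lt_of_le hk (min_le_left _ _)
  have hlb : k + 1 < lb.length := lt_of_lt_of_le hk (min_le_right _ _)
  have hz : k + 1 < (List.zipWith (fun x y : Char => x == y) la lb).length := by
    simpa [List.length_zipWith] using hk
  rw [PySem.List.slice_toNat _ (by positivity) (by positivity),
      PySem.List.slice_toNat _ (by positivity) (by positivity)]
  have ht : ((k : Int) + 2).toNat - ((k : Int)).toNat = 2 := by omega
  rw [ht, Int.toNat_natCast]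
  have expand : ∀ (l : List Char) (h : k + 1 < l.length),
      (l.drop k).take 2 = [l[k], l[k + 1]] := by
    intro l h
    rw [List.drop_eq_getElem_cons (by omega : k < l.length),
        List.drop_eq_getElem_cons (by omega : k + 1 < l.length)]
    rfl
  rw [expand la hla, expand lb hlb]
  rw [List.cons_eq_cons, List.cons_eq_cons]
  rw [show ((k : Int) + 1) = (((k + 1 : Nat) : Int)) by push_cast; ring,
      PySem.List.pyGetD_natCast, PySem.List.pyGetD_natCast,
      List.getD_eq_getElem _ _ (show k < (List.zipWith (fun x y : Char => x == y) la lb).length by omega),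
      List.getD_eq_getElem _ _ hz]
  simp [List.getElem_zipWith]

-- ===== VERDICT (by name: the statement is the Claim_ definition above) =====
theorem string_match_spec : Claim_equal_string_match := by
  intro a b _
  unfold Spec_string_match string_match string_match_alt
  dsimp only
  simp only [List.length_zipWith, Nat.cast_min]
  apply PySem.List.foldl_congr_mem
  intro acc i hi
  rw [PySem.List.mem_pyRange_one] at hi
  obtain ⟨h0, h1⟩ := hi
  obtain ⟨k, rfl⟩ : ∃ k : Nat, i = (k : Int) := ⟨i.toNat, (Int.toNat_of_nonneg h0).symm⟩
  have hk : k + 1 < min a.toList.length b.toList.length := by omega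
  rw [if_congr (pvStepEq a.toList b.toList k hk) rfl rfl]
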